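-- pv_equiv track=rewrite | github.com/1323216010/WorkBox | Python/CalculateDPC/nvm_pdx.py | NVMDecodeAddr
-- ===== SOURCE A (Python) =====
-- def NVMDecodeAddr(nvm_map, dp_number, dp_start_address, dp_end_address, Qmode=False):
--     """
--     解析 NVM 地图，提取 FD 数据点的 X 和 Y 坐标。
--
--     :param nvm_map: NVM 映射数据
--     :param dp_number: 数据点的数量
--     :param dp_start_address: 数据点起始地址
--     :param dp_end_address: 数据点结束地址
--     :return: X 坐标列表和 Y 坐标列表
--     """
--     dp_addr_offset_x = 0  # 仅用于 PIT
--     dp_addr_offset_y = 0  # 仅用于 PIT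
--     if Qmode:
--         dp_addr_bit_length_x = 13
--         dp_addr_bit_length_y = 12
--     else:
--         dp_addr_bit_length_x = 14
--         dp_addr_bit_length_y = 13
--
--
--     nvm_page = dp_start_address // 64
--     nvm_byte = dp_start_address % 64
--     nvm_dp_byte_num = dp_end_address - dp_start_address + 1
--     nvm_binary = ""
--
--     if nvm_dp_byte_num > 0:
--         for indx in range(nvm_dp_byte_num):
--             nvm_binary_tmp = format(int(nvm_map[nvm_byte][nvm_page], 16), '08b')
--             nvm_binary += nvm_binary_tmp
--             nvm_byte += 1
--             if nvm_byte > 63: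
--                 nvm_page += 1
--                 nvm_byte = 0
--
--         dp_address_x_nvm = []
--         dp_address_y_nvm = []
--
--         binary_count = 0
--         for indx in range(dp_number):
--             # X 地址
--             dp_address_x_tmp = int(nvm_binary[binary_count:binary_count + dp_addr_bit_length_x], 2)
--             dp_address_x_tmp -= dp_addr_offset_x  # 偏移修正
--             dp_address_x_tmp += 1  # Python 从 0 开始，MATLAB 从 1 开始
--             dp_address_x_nvm.append(dp_address_x_tmp)
--             binary_count += dp_addr_bit_length_x
--
--             # Y 地址
--             dp_address_y_tmp = int(nvm_binary[binary_count:binary_count + dp_addr_bit_length_y], 2)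
--             dp_address_y_tmp -= dp_addr_offset_y  # 偏移修正
--             dp_address_y_tmp += 1  # Python 从 0 开始，MATLAB 从 1 开始
--             dp_address_y_nvm.append(dp_address_y_tmp)
--             binary_count += dp_addr_bit_length_y
--     else:
--         dp_address_x_nvm = []
--         dp_address_y_nvm = []
--
--     return dp_address_x_nvm, dp_address_y_nvm
-- ===== SOURCE B (Python) =====
-- def NVMDecodeAddr(nvm_map, dp_number, dp_start_address, dp_end_address, Qmode=False):
--     """Decode FD data-point X/Y coordinates from an NVM map.
--
--     Packs the byte region into one big integer and extracts each bit-field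
--     by shift-and-mask instead of building a binary string.
--     """
--     if Qmode:
--         width_x, width_y = 13, 12
--     else:
--         width_x, width_y = 14, 13
--
--     byte_count = dp_end_address - dp_start_address + 1
--     if byte_count <= 0:
--         return [], []
--
--     acc = 0
--     for k in range(byte_count):
--         page, byte = divmod(dp_start_address + k, 64)
--         acc = acc * 256 + int(nvm_map[byte][page], 16)
--
--     total_bits = 8 * byte_count
--     xs, ys = [], []
--     offset = 0
--     for _ in range(dp_number):
--         xs.append((acc >> (total_bits - offset - width_x)) % (1 << width_x) + 1)
--         offset += width_x
--         ys.append((acc >> (total_bits - offset - width_y)) % (1 << width_y) + 1)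
--         offset += width_y
--     return xs, ys
-- ===== Notes on version B (the rewrite author's own statement) =====
-- stated objective: alternative
-- what changed: B packs the byte region into one big integer (acc = acc*256 + byte, cursor by divmod) and extracts each X/Y bit-field by shift-and-mask, instead of A's binary-string concatenation and string-slice reparsing; Pre_ restricts to the natural NVM domain (every referenced cell parses as one unsigned byte and the requested fields fit in the region) because outside it A raises or returns string-encoding artefacts (multi-byte cells shift all later bits; a field overhanging the end is silently truncated) while B raises on the overhang.
-- outside the precondition, e.g. on NVMDecodeAddr([['ab'], ['cd']], 1, 0, 1, False): A returns ([10996], [2]), B raises ValueError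
import Mathlib
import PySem

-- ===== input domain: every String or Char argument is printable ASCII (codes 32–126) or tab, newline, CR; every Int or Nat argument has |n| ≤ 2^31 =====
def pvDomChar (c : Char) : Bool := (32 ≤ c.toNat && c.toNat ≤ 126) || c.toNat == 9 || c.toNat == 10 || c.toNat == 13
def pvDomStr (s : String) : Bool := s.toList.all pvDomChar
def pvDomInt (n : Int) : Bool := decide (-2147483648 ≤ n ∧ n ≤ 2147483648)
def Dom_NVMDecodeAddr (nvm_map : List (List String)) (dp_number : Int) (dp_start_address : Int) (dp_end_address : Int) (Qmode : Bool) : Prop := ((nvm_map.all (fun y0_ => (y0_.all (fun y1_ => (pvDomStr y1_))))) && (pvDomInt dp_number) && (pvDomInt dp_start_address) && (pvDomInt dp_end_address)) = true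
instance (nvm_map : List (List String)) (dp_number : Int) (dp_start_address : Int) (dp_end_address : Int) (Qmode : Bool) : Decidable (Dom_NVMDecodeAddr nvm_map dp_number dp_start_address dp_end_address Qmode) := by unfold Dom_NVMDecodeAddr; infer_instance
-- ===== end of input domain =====

-- B replaces A's binary-string building and slicing by one big integer accumulator and
-- shift-and-mask field extraction (objective: alternative data representation, same cost class).

-- ===== PORT A =====

-- format(v, '08b'): exact for 0 ≤ v < 256, the range Pre_ admits for every decoded cell
def fmt08b (v : Int) : List Char :=
  (List.range 8).map (fun i => if PySem.Int.mod (PySem.Int.floordiv v (2 ^ (7 - i))) 2 = 1 then '1' else '0')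

-- int(s, 2) on the '0'/'1' strings A itself builds; exact on nonempty binary-digit strings
-- (the empty slice, where Python raises ValueError, is excluded by Pre_)
def bin2int (cs : List Char) : Int :=
  cs.foldl (fun a c => 2 * a + (if c = '1' then 1 else 0)) 0

def NVMDecodeAddr (nvm_map : List (List String)) (dp_number : Int) (dp_start_address : Int) (dp_end_address : Int) (Qmode : Bool) : List Int × List Int :=
  let dp_addr_offset_x : Int := 0
  let dp_addr_offset_y : Int := 0
  let dp_addr_bit_length_x : Int := if Qmode then 13 else 14
  let dp_addr_bit_length_y : Int := if Qmode then 12 else 13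
  let nvm_page := PySem.Int.floordiv dp_start_address 64
  let nvm_byte := PySem.Int.mod dp_start_address 64
  let nvm_dp_byte_num := dp_end_address - dp_start_address + 1
  if nvm_dp_byte_num > 0 then
    -- byte loop: state (nvm_page, nvm_byte, nvm_binary)
    let st := (PySem.List.pyRange 0 nvm_dp_byte_num 1).foldl (fun (st : Int × Int × List Char) _indx =>
      let nvm_page := st.1
      let nvm_byte := st.2.1
      let nvm_binary := st.2.2
      -- int(nvm_map[nvm_byte][nvm_page], 16): IndexError/ValueError (none) excluded by Pre_
      let v := (((PySem.List.pyGet? nvm_map nvm_byte).bind fun row => PySem.List.pyGet? row nvm_page).bind fun t => PySem.Int.ofStrBase? t 16).getD 0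
      let nvm_binary := nvm_binary ++ fmt08b v
      let nvm_byte := nvm_byte + 1
      if nvm_byte > 63 then (nvm_page + 1, (0 : Int), nvm_binary) else (nvm_page, nvm_byte, nvm_binary))
      (nvm_page, nvm_byte, ([] : List Char))
    let nvm_binary := st.2.2
    -- field loop: state (binary_count, dp_address_x_nvm, dp_address_y_nvm)
    let res := (PySem.List.pyRange 0 dp_number 1).foldl (fun (st : Int × List Int × List Int) _indx =>
      let binary_count := st.1
      let dp_address_x_nvm := st.2.1
      let dp_address_y_nvm := st.2.2
      let x := bin2int (PySem.List.slice nvm_binary (some binary_count) (some (binary_count + dp_addr_bit_length_x)))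
      let x := x - dp_addr_offset_x
      let x := x + 1
      let dp_address_x_nvm := dp_address_x_nvm ++ [x]
      let binary_count := binary_count + dp_addr_bit_length_x
      let y := bin2int (PySem.List.slice nvm_binary (some binary_count) (some (binary_count + dp_addr_bit_length_y)))
      let y := y - dp_addr_offset_y
      let y := y + 1
      let dp_address_y_nvm := dp_address_y_nvm ++ [y]
      let binary_count := binary_count + dp_addr_bit_length_y
      (binary_count, dp_address_x_nvm, dp_address_y_nvm)) ((0 : Int), ([] : List Int), ([] : List Int))
    (res.2.1, res.2.2)
  else ([], [])

-- ===== PORT B =====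

def NVMDecodeAddr_alt (nvm_map : List (List String)) (dp_number : Int) (dp_start_address : Int) (dp_end_address : Int) (Qmode : Bool) : List Int × List Int :=
  let width_x : Int := if Qmode then 13 else 14
  let width_y : Int := if Qmode then 12 else 13
  let byte_count := dp_end_address - dp_start_address + 1
  if byte_count ≤ 0 then ([], [])
  else
    -- acc = acc * 256 + int(nvm_map[byte][page], 16), cursor by divmod
    let acc := (PySem.List.pyRange 0 byte_count 1).foldl (fun acc k =>
      let page := PySem.Int.floordiv (dp_start_address + k) 64
      let byte := PySem.Int.mod (dp_start_address + k) 64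
      acc * 256 + (((PySem.List.pyGet? nvm_map byte).bind fun row => PySem.List.pyGet? row page).bind fun t => PySem.Int.ofStrBase? t 16).getD 0) 0
    let total_bits := 8 * byte_count
    -- acc >> k is >>> , 1 << w is <<< ; .toNat is exact for the nonnegative shifts Pre_ guarantees
    let res := (PySem.List.pyRange 0 dp_number 1).foldl (fun (st : Int × List Int × List Int) _ =>
      let offset := st.1
      let xs := st.2.1
      let ys := st.2.2
      let x := PySem.Int.mod (acc >>> (total_bits - offset - width_x).toNat) ((1 : Int) <<< width_x.toNat) + 1
      let offset := offset + width_x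
      let y := PySem.Int.mod (acc >>> (total_bits - offset - width_y).toNat) ((1 : Int) <<< width_y.toNat) + 1
      let offset := offset + width_y
      (offset, xs ++ [x], ys ++ [y])) ((0 : Int), ([] : List Int), ([] : List Int))
    (res.2.1, res.2.2)

-- ===== PRECONDITION & SPEC =====

-- value of cell nvm_map[a % 64][a // 64] as Python's int(_, 16) reads it (shared by Pre_ and the proofs)
def pvByteVal? (nvm_map : List (List String)) (a : Int) : Option Int :=
  ((PySem.List.pyGet? nvm_map (PySem.Int.mod a 64)).bind fun row => PySem.List.pyGet? row (PySem.Int.floordiv a 64)).bind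
    fun t => PySem.Int.ofStrBase? t 16

def pvByteOk (nvm_map : List (List String)) (a : Int) : Bool :=
  match pvByteVal? nvm_map a with
  | some v => decide (0 ≤ v) && decide (v < 256)
  | none => false

-- bytes at addresses a, a+1, …, a+j-1 all decode as single unsigned bytes (short-circuits)
def pvBytesOk (nvm_map : List (List String)) (a : Int) : Nat → Bool
  | 0 => true
  | j + 1 => pvByteOk nvm_map a && pvBytesOk nvm_map (a + 1) j

-- Pre_ restricts to the natural NVM domain: every referenced cell exists and parses as ONE unsigned
-- byte (int(x,16) ∈ [0,256)), and the requested bit-fields fit inside the byte region. Outside it A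
-- raises (missing cell, non-hex cell, field starting past the end) or returns artefacts of the
-- string encoding (multi-byte/negative cells shift all later bits; a field overhanging the end is
-- silently truncated) — B raises on the overhang and mis-places no bits, so those inputs are excluded.
def Pre_NVMDecodeAddr (nvm_map : List (List String)) (dp_number : Int) (dp_start_address : Int) (dp_end_address : Int) (Qmode : Bool) : Prop :=
  let wx : Int := if Qmode then 13 else 14
  let wy : Int := if Qmode then 12 else 13
  let n := dp_end_address - dp_start_address + 1
  n ≤ 0 ∨ (pvBytesOk nvm_map dp_start_address n.toNat = true ∧
           (dp_number ≤ 0 ∨ dp_number * (wx + wy) ≤ 8 * n))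
instance (nvm_map : List (List String)) (dp_number : Int) (dp_start_address : Int) (dp_end_address : Int) (Qmode : Bool) : Decidable (Pre_NVMDecodeAddr nvm_map dp_number dp_start_address dp_end_address Qmode) := by unfold Pre_NVMDecodeAddr; infer_instance

def pvWitness_NVMDecodeAddr : List (List String) × Int × Int × Int × Bool :=
  ([["1a"], ["2b"], ["3c"], ["4d"]], 1, 0, 3, false)

def Spec_NVMDecodeAddr (nvm_map : List (List String)) (dp_number : Int) (dp_start_address : Int) (dp_end_address : Int) (Qmode : Bool) (out : List Int × List Int) : Prop := out = NVMDecodeAddr_alt nvm_map dp_number dp_start_address dp_end_address Qmode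
instance (nvm_map : List (List String)) (dp_number : Int) (dp_start_address : Int) (dp_end_address : Int) (Qmode : Bool) (out : List Int × List Int) : Decidable (Spec_NVMDecodeAddr nvm_map dp_number dp_start_address dp_end_address Qmode out) := by unfold Spec_NVMDecodeAddr; infer_instance

-- ===== CLAIM (what is proved, stated in full; the proofs are below) =====
def Claim_equal_NVMDecodeAddr : Prop := ∀ (nvm_map : List (List String)) (dp_number : Int) (dp_start_address : Int) (dp_end_address : Int) (Qmode : Bool), Dom_NVMDecodeAddr nvm_map dp_number dp_start_address dp_end_address Qmode → Pre_NVMDecodeAddr nvm_map dp_number dp_start_address dp_end_address Qmode → Spec_NVMDecodeAddr nvm_map dp_number dp_start_address dp_end_address Qmode (NVMDecodeAddr nvm_map dp_number dp_start_address dp_end_address Qmode)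

-- ===== LEMMAS AND PROOFS =====

theorem pvBytesOk_spec (nvm_map : List (List String)) :
    ∀ (j : Nat) (a : Int), pvBytesOk nvm_map a j = true →
      ∀ k < j, pvByteOk nvm_map (a + (k : Int)) = true := by
  intro j
  induction j with
  | zero => intro a _ k hk; omega
  | succ j ih =>
    intro a h k hk
    rw [pvBytesOk, Bool.and_eq_true] at h
    cases k with
    | zero => simpa using h.1
    | succ k =>
      have := ih (a + 1) h.2 k (by omega)
      rw [show a + ((k + 1 : Nat) : Int) = a + 1 + (k : Int) by push_cast; ring]
      exact this

-- the byte value A and B both decode at linear address a, defaulted (Pre_ rules the default out)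
def byteVal (nvm_map : List (List String)) (a : Int) : Int := (pvByteVal? nvm_map a).getD 0

-- A's binary string after j bytes
def bigbin (nvm_map : List (List String)) (s : Int) (j : Nat) : List Char :=
  (List.range j).flatMap fun k => fmt08b (byteVal nvm_map (s + (k : Int)))

-- B's accumulator after j bytes
def accOf (nvm_map : List (List String)) (s : Int) (j : Nat) : Int :=
  (List.range j).foldl (fun a k => a * 256 + byteVal nvm_map (s + (k : Int))) 0

def allBinary (cs : List Char) : Prop := ∀ c ∈ cs, c = '0' ∨ c = '1'

theorem bigbin_succ (nvm_map : List (List String)) (s : Int) (j : Nat) :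
    bigbin nvm_map s (j + 1) = bigbin nvm_map s j ++ fmt08b (byteVal nvm_map (s + (j : Int))) := by
  simp [bigbin, List.range_succ]

theorem fmt08b_length (v : Int) : (fmt08b v).length = 8 := by simp [fmt08b]

theorem fmt08b_allBinary (v : Int) : allBinary (fmt08b v) := by
  intro c hc
  simp only [fmt08b, List.mem_map] at hc
  obtain ⟨i, -, rfl⟩ := hc
  split_ifs <;> simp

set_option maxRecDepth 10000 in
theorem fmt08b_val_nat : ∀ m : Nat, m < 256 → bin2int (fmt08b (m : Int)) = (m : Int) := by decide

theorem fmt08b_val (v : Int) (h0 : 0 ≤ v) (h1 : v < 256) : bin2int (fmt08b v) = v := by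
  obtain ⟨m, rfl⟩ := Int.eq_ofNat_of_zero_le h0
  exact fmt08b_val_nat m (by exact_mod_cast h1)

theorem bin2int_foldl (cs : List Char) (x : Int) :
    cs.foldl (fun a c => 2 * a + (if c = '1' then 1 else 0)) x = x * 2 ^ cs.length + bin2int cs := by
  induction cs generalizing x with
  | nil => simp [bin2int]
  | cons c t ih =>
    simp only [List.foldl_cons, List.length_cons, bin2int] at *
    rw [ih, ih (2 * 0 + _)]
    ring

theorem bin2int_append (a b : List Char) :
    bin2int (a ++ b) = bin2int a * 2 ^ b.length + bin2int b := by
  simp only [bin2int, List.foldl_append]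
  rw [show (List.foldl (fun a c => 2 * a + (if c = '1' then 1 else 0)) 0 a) = bin2int a from rfl,
      bin2int_foldl]
  rfl

theorem bin2int_bounds (cs : List Char) (h : allBinary cs) :
    0 ≤ bin2int cs ∧ bin2int cs < 2 ^ cs.length := by
  induction cs with
  | nil => simp [bin2int]
  | cons c t ih =>
    have hc := h c (by simp)
    have ht := ih (fun x hx => h x (by simp [hx]))
    have : bin2int (c :: t) = (2 * 0 + (if c = '1' then 1 else 0)) * 2 ^ t.length + bin2int t := by
      simp only [bin2int, List.foldl_cons]
      rw [bin2int_foldl]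
      rfl
    rw [this]
    have hb : (0 : Int) ≤ (if c = '1' then 1 else 0) ∧ ((if c = '1' then 1 else 0) : Int) ≤ 1 := by
      split_ifs <;> norm_num
    have hp : (0 : Int) < 2 ^ t.length := by positivity
    constructor
    · nlinarith [ht.1, hb.1]
    · simp only [List.length_cons, pow_succ]
      nlinarith [ht.2, hb.2]
  
theorem allBinary_append {a b : List Char} (ha : allBinary a) (hb : allBinary b) : allBinary (a ++ b) := by
  intro c hc
  rcases List.mem_append.mp hc with h | h
  · exact ha c h
  · exact hb c h

-- the cursor step of A's byte loop, in closed form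
theorem cursor_step (a : Int) :
    (if PySem.Int.mod a 64 + 1 > 63 then (PySem.Int.floordiv a 64 + 1, (0 : Int))
     else (PySem.Int.floordiv a 64, PySem.Int.mod a 64 + 1))
      = (PySem.Int.floordiv (a + 1) 64, PySem.Int.mod (a + 1) 64) := by
  have h1 := PySem.Int.floordiv_mul_add_mod a 64
  have h2 := PySem.Int.mod_nonneg a (b := 64) (by norm_num)
  have h3 := PySem.Int.mod_lt a (b := 64) (by norm_num)
  have h4 := PySem.Int.floordiv_mul_add_mod (a + 1) 64
  have h5 := PySem.Int.mod_nonneg (a + 1) (b := 64) (by norm_num)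
  have h6 := PySem.Int.mod_lt (a + 1) (b := 64) (by norm_num)
  split_ifs with h
  · have hq : PySem.Int.floordiv (a + 1) 64 = PySem.Int.floordiv a 64 + 1 := by omega
    have hm : PySem.Int.mod (a + 1) 64 = 0 := by omega
    rw [hq, hm]
  · have hq : PySem.Int.floordiv (a + 1) 64 = PySem.Int.floordiv a 64 := by omega
    have hm : PySem.Int.mod (a + 1) 64 = PySem.Int.mod a 64 + 1 := by omega
    rw [hq, hm]

-- A's byte loop: closed form of the state after j iterations
theorem loopA (nvm_map : List (List String)) (s : Int) (j : Nat) :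
    (PySem.List.pyRange 0 (j : Int) 1).foldl (fun (st : Int × Int × List Char) _indx =>
      let nvm_page := st.1
      let nvm_byte := st.2.1
      let nvm_binary := st.2.2
      let v := (((PySem.List.pyGet? nvm_map nvm_byte).bind fun row => PySem.List.pyGet? row nvm_page).bind fun t => PySem.Int.ofStrBase? t 16).getD 0
      let nvm_binary := nvm_binary ++ fmt08b v
      let nvm_byte := nvm_byte + 1
      if nvm_byte > 63 then (nvm_page + 1, (0 : Int), nvm_binary) else (nvm_page, nvm_byte, nvm_binary))
      (PySem.Int.floordiv s 64, PySem.Int.mod s 64, ([] : List Char))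
    = (PySem.Int.floordiv (s + j) 64, PySem.Int.mod (s + j) 64, bigbin nvm_map s j) := by
  induction j with
  | zero => simp [PySem.List.pyRange_one_eq_nil, bigbin]
  | succ j ih =>
    rw [show ((j + 1 : Nat) : Int) = (j : Int) + 1 by push_cast; ring,
        PySem.List.pyRange_one_succ_right (by positivity), List.foldl_append, ih]
    simp only [List.foldl_cons, List.foldl_nil]
    have hv : (((PySem.List.pyGet? nvm_map (PySem.Int.mod (s + j) 64)).bind fun row =>
        PySem.List.pyGet? row (PySem.Int.floordiv (s + j) 64)).bind fun t =>
        PySem.Int.ofStrBase? t 16).getD 0 = byteVal nvm_map (s + j) := rfl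
    have hb : bigbin nvm_map s j ++ fmt08b (byteVal nvm_map (s + j)) = bigbin nvm_map s (j + 1) := by
      simp [bigbin, List.range_succ]
    have := cursor_step (s + j)
    simp only [hv, hb] at *
    split_ifs with h
    · rw [Prod.mk.injEq] at this
      simp only [h, if_pos] at this
      rw [show s + ((j : Int) + 1) = s + j + 1 by ring, ← this.1, ← this.2]
    · rw [Prod.mk.injEq] at this
      simp only [h, if_neg, if_false] at this
      rw [show s + ((j : Int) + 1) = s + j + 1 by ring, ← this.1, ← this.2]

-- B's byte loop: closed form of the accumulator after j iterations
theorem loopB (nvm_map : List (List String)) (s : Int) (j : Nat) :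
    (PySem.List.pyRange 0 (j : Int) 1).foldl (fun acc k =>
      let page := PySem.Int.floordiv (s + k) 64
      let byte := PySem.Int.mod (s + k) 64
      acc * 256 + (((PySem.List.pyGet? nvm_map byte).bind fun row => PySem.List.pyGet? row page).bind fun t => PySem.Int.ofStrBase? t 16).getD 0) 0
    = accOf nvm_map s j := by
  induction j with
  | zero => simp [PySem.List.pyRange_one_eq_nil, accOf]
  | succ j ih =>
    rw [show ((j + 1 : Nat) : Int) = (j : Int) + 1 by push_cast; ring,
        PySem.List.pyRange_one_succ_right (by positivity), List.foldl_append, ih]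
    simp [accOf, List.range_succ, byteVal, pvByteVal?]

theorem bigbin_length (nvm_map : List (List String)) (s : Int) (j : Nat) :
    (bigbin nvm_map s j).length = 8 * j := by
  induction j with
  | zero => simp [bigbin]
  | succ j ih =>
    rw [bigbin_succ, List.length_append, ih, fmt08b_length]
    ring

theorem bigbin_allBinary (nvm_map : List (List String)) (s : Int) (j : Nat) :
    allBinary (bigbin nvm_map s j) := by
  induction j with
  | zero => intro c hc; simp [bigbin] at hc
  | succ j ih =>
    rw [bigbin_succ]
    exact allBinary_append ih (fmt08b_allBinary _)

-- with every byte in range, the accumulator is exactly the value of A's binary string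
theorem acc_eq_bin2int (nvm_map : List (List String)) (s : Int) (j : Nat)
    (hP : ∀ k < j, pvByteOk nvm_map (s + (k : Int)) = true) :
    accOf nvm_map s j = bin2int (bigbin nvm_map s j) := by
  induction j with
  | zero => simp [accOf, bigbin, bin2int]
  | succ j ih =>
    have hk := hP j (by omega)
    have hv : 0 ≤ byteVal nvm_map (s + j) ∧ byteVal nvm_map (s + j) < 256 := by
      unfold pvByteOk at hk
      unfold byteVal
      cases h : pvByteVal? nvm_map (s + (j : Int)) with
      | none => rw [h] at hk; simp at hk
      | some v => rw [h] at hk; simp at hk ⊢; exact hk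
    have : bigbin nvm_map s (j + 1) = bigbin nvm_map s j ++ fmt08b (byteVal nvm_map (s + j)) := by
      simp [bigbin, List.range_succ]
    rw [this, bin2int_append, fmt08b_length, fmt08b_val _ hv.1 hv.2,
        ← ih (fun k hk' => hP k (by omega))]
    simp [accOf, List.range_succ]

-- value of a full-width slice of a binary string, as shift-and-mask arithmetic
theorem field_eq (bin : List Char) (hbin : allBinary bin) (c w : Int)
    (hc : 0 ≤ c) (hw : 0 ≤ w) (hcw : c + w ≤ (bin.length : Int)) :
    bin2int (PySem.List.slice bin (some c) (some (c + w)))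
      = PySem.Int.mod (bin2int bin >>> ((bin.length : Int) - c - w).toNat) ((1 : Int) <<< w.toNat) := by
  have hL : ((bin.length : Int) - c - w).toNat = bin.length - c.toNat - w.toNat := by omega
  have hslice : PySem.List.slice bin (some c) (some (c + w)) = (bin.drop c.toNat).take w.toNat := by
    rw [PySem.List.slice_toNat bin hc (by omega)]
    congr 1
    omega
  set t1 := bin.take c.toNat with ht1
  set mid := (bin.drop c.toNat).take w.toNat with hmid
  set t3 := (bin.drop c.toNat).drop w.toNat with ht3
  have hsplit : bin = t1 ++ (mid ++ t3) := by
    rw [ht1, hmid, ht3, List.take_append_drop, List.take_append_drop]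
  have hlen1 : t1.length = c.toNat := by
    rw [ht1, List.length_take]; omega
  have hlenm : mid.length = w.toNat := by
    rw [hmid, List.length_take, List.length_drop]; omega
  have hlen3 : t3.length = bin.length - c.toNat - w.toNat := by
    rw [ht3, List.length_drop, List.length_drop]
  have hbm : allBinary mid := fun x hx => hbin x (by rw [hsplit]; simp [hx])
  have hb3 : allBinary t3 := fun x hx => hbin x (by rw [hsplit]; simp [hx])
  have hmb := bin2int_bounds mid hbm
  have h3b := bin2int_bounds t3 hb3
  have hval : bin2int bin = (bin2int t1 * 2 ^ w.toNat + bin2int mid) * 2 ^ t3.length + bin2int t3 := by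
    rw [hsplit, bin2int_append, bin2int_append, List.length_append, hlenm]
    ring
  have hdiv : ((bin2int t1 * 2 ^ w.toNat + bin2int mid) * 2 ^ t3.length + bin2int t3) / 2 ^ t3.length
      = bin2int t1 * 2 ^ w.toNat + bin2int mid := by
    rw [add_comm, Int.add_mul_ediv_right _ _ (by positivity : (2 : Int) ^ t3.length ≠ 0),
        Int.ediv_eq_zero_of_lt h3b.1 h3b.2, zero_add]
  have hmod : (bin2int t1 * 2 ^ w.toNat + bin2int mid) % 2 ^ w.toNat = bin2int mid := by
    rw [add_comm, mul_comm, Int.add_mul_emod_self_left]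
    exact Int.emod_eq_of_lt hmb.1 (hlenm ▸ hmb.2)
  rw [hslice, Int.shiftRight_eq_div_pow, Int.shiftLeft_eq, one_mul,
      PySem.Int.mod_eq_emod_of_pos (by positivity)]
  push_cast
  rw [hL, ← hlen3, hval, hdiv, hmod]

-- closed forms of the decoded fields (stated over the binary string; acc = bin2int bin)
def Xf (bin : List Char) (wx wy : Int) (i : Nat) : Int :=
  PySem.Int.mod (bin2int bin >>> ((bin.length : Int) - (i : Int) * (wx + wy) - wx).toNat) ((1 : Int) <<< wx.toNat) + 1
def Yf (bin : List Char) (wx wy : Int) (i : Nat) : Int :=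
  PySem.Int.mod (bin2int bin >>> ((bin.length : Int) - ((i : Int) * (wx + wy) + wx) - wy).toNat) ((1 : Int) <<< wy.toNat) + 1

-- A's field loop: closed form after j iterations
theorem loop2A (bin : List Char) (hbin : allBinary bin) (wx wy : Int)
    (hwx : 0 ≤ wx) (hwy : 0 ≤ wy) (j : Nat) (hj : (j : Int) * (wx + wy) ≤ (bin.length : Int)) :
    (PySem.List.pyRange 0 (j : Int) 1).foldl (fun (st : Int × List Int × List Int) _indx =>
      let binary_count := st.1
      let xs := st.2.1
      let ys := st.2.2
      let x := bin2int (PySem.List.slice bin (some binary_count) (some (binary_count + wx)))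
      let x := x - 0
      let x := x + 1
      let xs := xs ++ [x]
      let binary_count := binary_count + wx
      let y := bin2int (PySem.List.slice bin (some binary_count) (some (binary_count + wy)))
      let y := y - 0
      let y := y + 1
      let ys := ys ++ [y]
      let binary_count := binary_count + wy
      (binary_count, xs, ys)) ((0 : Int), ([] : List Int), ([] : List Int))
    = ((j : Int) * (wx + wy), (List.range j).map (Xf bin wx wy), (List.range j).map (Yf bin wx wy)) := by
  induction j with
  | zero => simp [PySem.List.pyRange_one_eq_nil]
  | succ j ih =>
    push_cast at hj
    have hw0 : (0 : Int) ≤ wx + wy := by linarith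
    have hexp : ((j : Int) + 1) * (wx + wy) = (j : Int) * (wx + wy) + (wx + wy) := by ring
    have hj' : (j : Int) * (wx + wy) ≤ (bin.length : Int) := by linarith
    rw [show ((j + 1 : Nat) : Int) = (j : Int) + 1 by push_cast; ring,
        PySem.List.pyRange_one_succ_right (by positivity), List.foldl_append, ih hj']
    simp only [List.foldl_cons, List.foldl_nil]
    have hx := field_eq bin hbin ((j : Int) * (wx + wy)) wx
      (mul_nonneg (Nat.cast_nonneg j) hw0) hwx (by linarith)
    have hy := field_eq bin hbin ((j : Int) * (wx + wy) + wx) wy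
      (by nlinarith [Nat.cast_nonneg (α := ℤ) j]) hwy (by linarith)
    simp only [hx, hy, List.range_succ, List.map_append, List.map_cons, List.map_nil,
      Prod.mk.injEq]
    refine ⟨by push_cast; ring, ?_, ?_⟩ <;> simp [Xf, Yf]

-- B's field loop: the same closed form
theorem loop2B (bin : List Char) (acc total : Int) (hacc : acc = bin2int bin)
    (htot : total = (bin.length : Int)) (wx wy : Int) (j : Nat) :
    (PySem.List.pyRange 0 (j : Int) 1).foldl (fun (st : Int × List Int × List Int) _ =>
      let offset := st.1
      let xs := st.2.1
      let ys := st.2.2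
      let x := PySem.Int.mod (acc >>> (total - offset - wx).toNat) ((1 : Int) <<< wx.toNat) + 1
      let offset := offset + wx
      let y := PySem.Int.mod (acc >>> (total - offset - wy).toNat) ((1 : Int) <<< wy.toNat) + 1
      let offset := offset + wy
      (offset, xs ++ [x], ys ++ [y])) ((0 : Int), ([] : List Int), ([] : List Int))
    = ((j : Int) * (wx + wy), (List.range j).map (Xf bin wx wy), (List.range j).map (Yf bin wx wy)) := by
  subst hacc htot
  induction j with
  | zero => simp [PySem.List.pyRange_one_eq_nil]
  | succ j ih =>
    rw [show ((j + 1 : Nat) : Int) = (j : Int) + 1 by push_cast; ring,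
        PySem.List.pyRange_one_succ_right (by positivity), List.foldl_append, ih]
    simp only [List.foldl_cons, List.foldl_nil, List.range_succ, List.map_append, List.map_cons,
      List.map_nil, Prod.mk.injEq]
    refine ⟨by push_cast; ring, ?_, ?_⟩ <;> simp [Xf, Yf]

-- ===== VERDICT (by name: the statement is the Claim_ definition above) =====
theorem NVMDecodeAddr_spec : Claim_equal_NVMDecodeAddr := by
  intro nvm_map dp_number s e Qmode _hD hP
  unfold Spec_NVMDecodeAddr NVMDecodeAddr NVMDecodeAddr_alt
  simp only []
  set wx : Int := if Qmode then 13 else 14 with hwxd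
  set wy : Int := if Qmode then 12 else 13 with hwyd
  have hwx : 0 ≤ wx := by rw [hwxd]; split_ifs <;> norm_num
  have hwy : 0 ≤ wy := by rw [hwyd]; split_ifs <;> norm_num
  set n := e - s + 1 with hn
  by_cases hpos : n > 0
  · rw [if_pos hpos, if_neg (by omega)]
    unfold Pre_NVMDecodeAddr at hP
    rw [← hn] at hP
    rcases hP with h | ⟨hbytes, hfits⟩
    · omega
    have hncast : ((n.toNat : Nat) : Int) = n := by omega
    have hA1 := loopA nvm_map s n.toNat
    have hB1 := loopB nvm_map s n.toNat
    rw [hncast] at hA1 hB1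
    rw [hA1, hB1]
    set bin := bigbin nvm_map s n.toNat with hbin
    have hlen : ((bin.length : Nat) : Int) = 8 * n := by
      rw [hbin, bigbin_length]; omega
    have hacc : accOf nvm_map s n.toNat = bin2int bin :=
      acc_eq_bin2int nvm_map s n.toNat (pvBytesOk_spec nvm_map n.toNat s hbytes)
    have hallb : allBinary bin := bigbin_allBinary nvm_map s n.toNat
    by_cases hd : dp_number ≤ 0
    · rw [PySem.List.pyRange_one_eq_nil hd]
      simp
    · have hdcast : ((dp_number.toNat : Nat) : Int) = dp_number := by omega
      have hfit : dp_number * (wx + wy) ≤ 8 * n := by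
        rcases hfits with h | h
        · omega
        · exact h
      have hA2 := loop2A bin hallb wx wy hwx hwy dp_number.toNat
        (by rw [hdcast, hlen]; exact hfit)
      have hB2 := loop2B bin (accOf nvm_map s n.toNat) (8 * n) hacc (by omega) wx wy dp_number.toNat
      rw [hdcast] at hA2 hB2
      rw [hA2, hB2]
  · rw [if_neg hpos, if_pos (by omega)]
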